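-- pv_equiv track=rewrite | github.com/SimonSlominski/Codewars | 7_kyu/7_kyu_Capitals first!.py | capitals_first
-- ===== SOURCE A (Python) =====
-- def capitals_first(text):
--     upper_words = ' '.join([word for word in text.split() if word[0].isupper()])
--     lower_words = ' '.join(word for word in text.split() if word[0].islower())
--
--     if upper_words and lower_words:
--         return upper_words + " " + lower_words
--     elif upper_words and not lower_words:
--         return upper_words
--     else:
--         return lower_words
-- ===== SOURCE B (Python) =====
-- def capitals_first(text):
--     words = [w for w in text.split() if w[0].isupper() or w[0].islower()]
--     words.sort(key=lambda w: not w[0].isupper())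
--     return ' '.join(words)
-- ===== Notes on version B (the rewrite author's own statement) =====
-- stated objective: simpler
-- what changed: A filters the words twice into two joined strings and picks among three return branches; B filters once for letter-headed words, stably sorts them on the boolean key (whether the word lacks a capitalized head), and joins once, making the branch logic unnecessary.
import Mathlib
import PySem

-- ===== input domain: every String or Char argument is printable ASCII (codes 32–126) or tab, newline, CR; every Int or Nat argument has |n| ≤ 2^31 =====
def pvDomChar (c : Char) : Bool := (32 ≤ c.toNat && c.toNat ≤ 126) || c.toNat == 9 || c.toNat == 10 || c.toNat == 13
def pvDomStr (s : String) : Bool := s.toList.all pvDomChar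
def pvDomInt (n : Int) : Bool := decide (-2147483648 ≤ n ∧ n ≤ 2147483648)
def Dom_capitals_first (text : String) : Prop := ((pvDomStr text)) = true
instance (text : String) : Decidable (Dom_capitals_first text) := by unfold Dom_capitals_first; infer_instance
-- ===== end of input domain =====

-- B replaces A's two filter-and-join passes plus manual branch logic by one filter and a
-- stable sort on the boolean "not capitalized" key, joined once (objective: simpler).


-- ===== PORT A =====
-- word[0].isupper() / word[0].islower(): split₀ never yields empty words, so the `none`
-- branch (Python's IndexError) is unreachable on both ports' inputs; exact.
def pvHeadUpper (w : List Char) : Bool :=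
  match PySem.List.pyGet? w 0 with
  | some c => PySem.Chars.isupper c
  | none => false

def pvHeadLower (w : List Char) : Bool :=
  match PySem.List.pyGet? w 0 with
  | some c => PySem.Chars.islower c
  | none => false

def capitals_first (text : String) : String :=
  let upper_words := PySem.Chars.join [' '] ((PySem.Chars.split₀ text.toList).filter pvHeadUpper)
  let lower_words := PySem.Chars.join [' '] ((PySem.Chars.split₀ text.toList).filter pvHeadLower)
  if !upper_words.isEmpty && !lower_words.isEmpty then
    String.ofList (upper_words ++ [' '] ++ lower_words)
  else if !upper_words.isEmpty && lower_words.isEmpty then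
    String.ofList upper_words
  else
    String.ofList lower_words

-- ===== PORT B =====
def capitals_first_alt (text : String) : String :=
  let words := (PySem.Chars.split₀ text.toList).filter (fun w => pvHeadUpper w || pvHeadLower w)
  let sortedWords := PySem.List.sorted words (fun w => !pvHeadUpper w) false
  String.ofList (PySem.Chars.join [' '] sortedWords)

-- ===== PRECONDITION & SPEC =====
def Spec_capitals_first (text : String) (out : String) : Prop := out = capitals_first_alt text
instance (text : String) (out : String) : Decidable (Spec_capitals_first text out) := by unfold Spec_capitals_first; infer_instance

-- ===== CLAIM (what is proved, stated in full; the proofs are below) =====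
def Claim_equal_capitals_first : Prop := ∀ (text : String), Dom_capitals_first text → Spec_capitals_first text (capitals_first text)

-- ===== LEMMAS AND PROOFS =====

-- inserting a true-keyed element goes to the very end (stability on equal keys)
theorem pv_insert_true {α : Type} (key : α → Bool) (x : α) (hx : key x = true) (zs : List α) :
    PySem.List.insertBy (fun a b => decide (key a < key b)) x zs = zs ++ [x] := by
  apply PySem.List.insertBy_of_forall_not_before
  intro y _
  cases hy : key y <;> simp [hx]

-- inserting a false-keyed element lands exactly between the false and the true group
theorem pv_insert_false {α : Type} (key : α → Bool) (x : α) (hx : key x = false) :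
    ∀ (fs : List α), (∀ y ∈ fs, key y = false) → ∀ (ts : List α), (∀ y ∈ ts, key y = true) →
      PySem.List.insertBy (fun a b => decide (key a < key b)) x (fs ++ ts) = fs ++ x :: ts := by
  intro fs
  induction fs with
  | nil =>
    intro _ ts ht
    cases ts with
    | nil => simp [PySem.List.insertBy]
    | cons t ts' =>
      have hkt := ht t (by simp)
      simp [PySem.List.insertBy, hx, hkt]
  | cons f fs' ih =>
    intro hf ts ht
    have hkf := hf f (by simp)
    have hrec := ih (fun y hy => hf y (by simp [hy])) ts ht
    simp [PySem.List.insertBy, hx, hkf, hrec]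

-- the insertion-sort fold with a boolean key keeps the accumulator stably partitioned
theorem pv_foldl_partition {α : Type} (key : α → Bool) (xs : List α) :
    ∀ (fs ts : List α), (∀ y ∈ fs, key y = false) → (∀ y ∈ ts, key y = true) →
      xs.foldl (fun acc x => PySem.List.insertBy (fun a b => decide (key a < key b)) x acc) (fs ++ ts) =
        (fs ++ xs.filter (fun x => !key x)) ++ (ts ++ xs.filter (fun x => key x)) := by
  induction xs with
  | nil => intro fs ts _ _; simp
  | cons x xs ih =>
    intro fs ts hf ht
    rw [List.foldl_cons]
    by_cases hx : key x = true
    · rw [pv_insert_true key x hx (fs ++ ts)]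
      have ht' : ∀ y ∈ ts ++ [x], key y = true := by
        intro y hy
        rcases List.mem_append.1 hy with h | h
        · exact ht y h
        · simp at h; subst h; exact hx
      rw [List.append_assoc, ih fs (ts ++ [x]) hf ht']
      simp [hx]
    · have hx' : key x = false := by simpa using hx
      rw [pv_insert_false key x hx' fs hf ts ht]
      have hf' : ∀ y ∈ fs ++ [x], key y = false := by
        intro y hy
        rcases List.mem_append.1 hy with h | h
        · exact hf y h
        · simp at h; subst h; exact hx'
      rw [show fs ++ x :: ts = (fs ++ [x]) ++ ts by simp, ih (fs ++ [x]) ts hf' ht]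
      simp [hx']

-- stable sort on a boolean key is the stable partition
theorem pv_sorted_bool_partition {α : Type} (key : α → Bool) (xs : List α) :
    PySem.List.sorted xs key false =
      xs.filter (fun x => !key x) ++ xs.filter (fun x => key x) := by
  rw [PySem.List.sorted_eq_foldl_insertBy]
  have := pv_foldl_partition key xs [] [] (by simp) (by simp)
  simpa using this

-- joining a nonempty list of nonempty words is nonempty
theorem pv_join_ne_nil (us : List (List Char)) (h : ∀ w ∈ us, w ≠ []) (hne : us ≠ []) :
    PySem.Chars.join [' '] us ≠ [] := by
  cases us with
  | nil => exact absurd rfl hne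
  | cons w rest =>
    cases rest with
    | nil =>
      rw [PySem.Chars.join_singleton]
      exact h w (by simp)
    | cons q rest' =>
      rw [PySem.Chars.join_cons_cons]
      simp

-- join over an append of two nonempty groups
theorem pv_join_append (us ls : List (List Char)) (hu : us ≠ []) (hl : ls ≠ []) :
    PySem.Chars.join [' '] (us ++ ls) =
      PySem.Chars.join [' '] us ++ [' '] ++ PySem.Chars.join [' '] ls := by
  induction us with
  | nil => exact absurd rfl hu
  | cons w rest ih =>
    cases rest with
    | nil =>
      cases ls with
      | nil => exact absurd rfl hl
      | cons l ls' =>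
        rw [PySem.Chars.join_singleton]
        simpa using PySem.Chars.join_cons_cons [' '] w l ls'
    | cons q rest' =>
      have hrest : q :: rest' ≠ [] := by simp
      have e : PySem.Chars.join [' '] ((w :: q :: rest') ++ ls) =
          w ++ [' '] ++ PySem.Chars.join [' '] ((q :: rest') ++ ls) :=
        PySem.Chars.join_cons_cons [' '] w q (rest' ++ ls)
      rw [e, ih hrest, PySem.Chars.join_cons_cons]
      simp

-- a word passing either head test is nonempty
theorem pv_head_ne_nil (w : List Char) (h : pvHeadUpper w = true ∨ pvHeadLower w = true) : w ≠ [] := by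
  intro hw
  subst hw
  rcases h with h | h <;> simp [pvHeadUpper, pvHeadLower, PySem.List.pyGet?] at h

-- an upper-headed word is not lower-headed (the ASCII ranges are disjoint)
theorem pv_upper_not_lower (w : List Char) (h : pvHeadUpper w = true) : pvHeadLower w = false := by
  unfold pvHeadUpper at h
  unfold pvHeadLower
  cases hg : PySem.List.pyGet? w 0 with
  | none => rfl
  | some c =>
    rw [hg] at h
    simp [PySem.Chars.isupper] at h
    simp [PySem.Chars.islower]
    intro h1
    exact absurd (le_trans h1 h.2) (by decide)

-- ===== VERDICT (by name: the statement is the Claim_ definition above) =====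
theorem capitals_first_spec : Claim_equal_capitals_first := by
  intro text _
  simp only [Spec_capitals_first, capitals_first, capitals_first_alt]
  set ws := PySem.Chars.split₀ text.toList with hws
  have hpart := pv_sorted_bool_partition (fun w => !pvHeadUpper w)
      (ws.filter (fun w => pvHeadUpper w || pvHeadLower w))
  have hfu : (ws.filter (fun w => pvHeadUpper w || pvHeadLower w)).filter
      (fun x => !(!pvHeadUpper x)) = ws.filter pvHeadUpper := by
    rw [List.filter_filter]
    apply List.filter_congr
    intro w _
    by_cases h : pvHeadUpper w <;> simp [h]
  have hfl : (ws.filter (fun w => pvHeadUpper w || pvHeadLower w)).filter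
      (fun x => !pvHeadUpper x) = ws.filter pvHeadLower := by
    rw [List.filter_filter]
    apply List.filter_congr
    intro w _
    by_cases h : pvHeadUpper w
    · simp [h, pv_upper_not_lower w h]
    · simp [h]
  rw [hpart, hfu, hfl]
  set us := ws.filter pvHeadUpper with hus
  set ls := ws.filter pvHeadLower with hls
  have husne : ∀ w ∈ us, w ≠ [] := by
    intro w hw
    exact pv_head_ne_nil w (Or.inl (List.of_mem_filter hw))
  have hlsne : ∀ w ∈ ls, w ≠ [] := by
    intro w hw
    exact pv_head_ne_nil w (Or.inr (List.of_mem_filter hw))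
  by_cases hu : us = []
  · simp [hu, PySem.Chars.join_nil]
  · by_cases hl : ls = []
    · have hj := pv_join_ne_nil us husne hu
      simp [hl, PySem.Chars.join_nil, hj]
    · have hju := pv_join_ne_nil us husne hu
      have hjl := pv_join_ne_nil ls hlsne hl
      rw [pv_join_append us ls hu hl]
      simp [hju, hjl]
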